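-- pv_equiv track=rewrite | github.com/mik11231/python | aoclib/intervals.py | first_gap
-- ===== SOURCE A (Python) =====
-- def merge_intervals(intervals: list[tuple[int, int]], *, touch: bool = True) -> list[tuple[int, int]]:
--     """Merge sorted/unsorted inclusive intervals.
--
--     When `touch=True`, adjacent intervals like [1,3] and [4,5] are merged.
--     """
--     if not intervals:
--         return []
--
--     sorted_intervals = sorted(intervals)
--     merged: list[tuple[int, int]] = [sorted_intervals[0]]
--     for a, b in sorted_intervals[1:]:
--         ma, mb = merged[-1]
--         limit = mb + 1 if touch else mb
--         if a > limit:
--             merged.append((a, b))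
--         else:
--             merged[-1] = (ma, max(mb, b))
--     return merged
--
-- def first_gap(intervals: list[tuple[int, int]], lo: int, hi: int) -> int | None:
--     """Return the first uncovered x in [lo, hi] for inclusive intervals."""
--     x = lo
--     for a, b in merge_intervals(intervals, touch=True):
--         if a > x:
--             return x
--         x = max(x, b + 1)
--         if x > hi:
--             return None
--     return x if x <= hi else None
-- ===== SOURCE B (Python) =====
-- def first_gap(intervals, lo, hi):
--     """Single fused sweep: sort the raw intervals once and track the first
--     uncovered point directly, without building a merged-interval list."""
--     x = lo
--     for a, b in sorted(intervals):
--         if a > x: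
--             return x
--         x = max(x, b + 1)
--         if x > hi:
--             return None
--     return x if x <= hi else None
-- ===== Notes on version B (the rewrite author's own statement) =====
-- stated objective: simpler
-- what changed: B drops merge_intervals entirely: instead of building a merged interval list and then scanning it, B sorts the raw intervals once and fuses merging and gap-detection into a single sweep tracking the first uncovered point.
import Mathlib
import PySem

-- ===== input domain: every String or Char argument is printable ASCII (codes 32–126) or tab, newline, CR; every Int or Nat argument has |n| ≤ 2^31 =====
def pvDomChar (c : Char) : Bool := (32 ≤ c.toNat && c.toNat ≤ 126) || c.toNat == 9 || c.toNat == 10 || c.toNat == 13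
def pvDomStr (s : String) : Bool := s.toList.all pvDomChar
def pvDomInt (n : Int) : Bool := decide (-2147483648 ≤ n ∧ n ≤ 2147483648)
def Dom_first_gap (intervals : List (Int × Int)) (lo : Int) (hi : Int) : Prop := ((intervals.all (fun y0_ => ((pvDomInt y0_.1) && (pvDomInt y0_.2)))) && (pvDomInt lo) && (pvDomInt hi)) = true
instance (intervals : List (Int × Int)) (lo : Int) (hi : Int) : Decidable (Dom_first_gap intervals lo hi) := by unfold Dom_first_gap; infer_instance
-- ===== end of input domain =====

-- B fuses merge_intervals and the scan into one sweep over the sorted raw intervals (objective: simpler).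

-- ===== PORT A =====
-- loop of merge_intervals (touch=True): `cur` is merged[-1], earlier finalized entries are cons'd
def mergeGo (cur : Int × Int) : List (Int × Int) → List (Int × Int)
  | [] => [cur]
  | (a, b) :: rest =>
      if a > cur.2 + 1 then cur :: mergeGo (a, b) rest
      else mergeGo (cur.1, max cur.2 b) rest

def merge_intervals (intervals : List (Int × Int)) : List (Int × Int) :=
  match PySem.List.sorted2 intervals Prod.fst Prod.snd false with
  | [] => []
  | h :: t => mergeGo h t

-- the `for a, b in merge_intervals(...)` loop of A
def firstGapScan (merged : List (Int × Int)) (x : Int) (hi : Int) : Option Int :=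
  match merged with
  | [] => if x ≤ hi then some x else none
  | (a, b) :: rest =>
      if a > x then some x
      else
        let x' := max x (b + 1)
        if x' > hi then none else firstGapScan rest x' hi

def first_gap (intervals : List (Int × Int)) (lo : Int) (hi : Int) : Option Int :=
  firstGapScan (merge_intervals intervals) lo hi

-- ===== PORT B =====
-- B's single fused sweep over the sorted raw intervals
def sweep (xs : List (Int × Int)) (x : Int) (hi : Int) : Option Int :=
  match xs with
  | [] => if x ≤ hi then some x else none
  | (a, b) :: rest =>
      if a > x then some x
      else
        let x' := max x (b + 1)
        if x' > hi then none else sweep rest x' hi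

def first_gap_alt (intervals : List (Int × Int)) (lo : Int) (hi : Int) : Option Int :=
  sweep (PySem.List.sorted2 intervals Prod.fst Prod.snd false) lo hi

-- ===== PRECONDITION & SPEC =====
def Spec_first_gap (intervals : List (Int × Int)) (lo : Int) (hi : Int) (out : Option Int) : Prop := out = first_gap_alt intervals lo hi
instance (intervals : List (Int × Int)) (lo : Int) (hi : Int) (out : Option Int) : Decidable (Spec_first_gap intervals lo hi out) := by unfold Spec_first_gap; infer_instance

-- ===== CLAIM (what is proved, stated in full; the proofs are below) =====
def Claim_equal_first_gap : Prop := ∀ (intervals : List (Int × Int)) (lo : Int) (hi : Int), Dom_first_gap intervals lo hi → Spec_first_gap intervals lo hi (first_gap intervals lo hi)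

-- ===== LEMMAS AND PROOFS =====

theorem sweep_eq_scan (xs : List (Int × Int)) (x hi : Int) :
    sweep xs x hi = firstGapScan xs x hi := by
  induction xs generalizing x with
  | nil => rfl
  | cons p rest ih =>
      obtain ⟨a, b⟩ := p
      simp only [sweep, firstGapScan, ih]

-- scanning the merged list equals sweeping the unmerged tail with current last `cur`
theorem scan_mergeGo (t : List (Int × Int)) (cur : Int × Int) (x hi : Int) :
    firstGapScan (mergeGo cur t) x hi = firstGapScan (cur :: t) x hi := by
  induction t generalizing cur x with
  | nil => rfl
  | cons p rest ih =>
      obtain ⟨a, b⟩ := p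
      obtain ⟨ma, mb⟩ := cur
      by_cases hmerge : a > mb + 1
      · simp only [mergeGo, if_pos hmerge, firstGapScan, ih]
      · simp only [mergeGo, if_neg hmerge]
        rw [ih]
        have hx : max (max x (mb + 1)) (b + 1) = max x (max mb b + 1) := by omega
        simp only [firstGapScan]
        split_ifs <;> first | rfl | (exfalso; omega) | (rw [hx])

-- ===== VERDICT (by name: the statement is the Claim_ definition above) =====
theorem first_gap_spec : Claim_equal_first_gap := by
  intro intervals lo hi _
  unfold Spec_first_gap first_gap first_gap_alt merge_intervals
  rw [sweep_eq_scan]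
  cases h : PySem.List.sorted2 intervals Prod.fst Prod.snd false with
  | nil => rfl
  | cons hd tl => rw [scan_mergeGo]
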